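-- pv_equiv track=rewrite | github.com/openstack-archive/fuel-web | nailgun/nailgun/api/swagger.py | get_handler_operation_responses
-- ===== SOURCE A (Python) =====
-- def get_handler_operation_responses(parsed_doctree):
--     ret = {}
--
--     for type_, code, description in parsed_doctree:
--         if type_ == 'statuscode':
--             ret.setdefault(code, [])
--             ret[code].append(description)
--
--     return dict([
--         (k, {'description': ' OR '.join(v)}) for k, v in ret.items()
--     ])
-- ===== SOURCE B (Python) =====
-- def get_handler_operation_responses(parsed_doctree):
--     codes = []
--     for type_, code, _ in parsed_doctree:
--         if type_ == 'statuscode' and code not in codes: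
--             codes.append(code)
--     return {
--         code: {'description': ' OR '.join(
--             d for t, c, d in parsed_doctree
--             if t == 'statuscode' and c == code)}
--         for code in codes
--     }
-- ===== Notes on version B (the rewrite author's own statement) =====
-- stated objective: alternative
-- what changed: Replaces the dict-of-lists accumulation (setdefault/append then a rebuild comprehension) by a two-phase traversal: first collect the distinct status codes in first-occurrence order, then build the result directly with one generator-filter pass per code.
import Mathlib
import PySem

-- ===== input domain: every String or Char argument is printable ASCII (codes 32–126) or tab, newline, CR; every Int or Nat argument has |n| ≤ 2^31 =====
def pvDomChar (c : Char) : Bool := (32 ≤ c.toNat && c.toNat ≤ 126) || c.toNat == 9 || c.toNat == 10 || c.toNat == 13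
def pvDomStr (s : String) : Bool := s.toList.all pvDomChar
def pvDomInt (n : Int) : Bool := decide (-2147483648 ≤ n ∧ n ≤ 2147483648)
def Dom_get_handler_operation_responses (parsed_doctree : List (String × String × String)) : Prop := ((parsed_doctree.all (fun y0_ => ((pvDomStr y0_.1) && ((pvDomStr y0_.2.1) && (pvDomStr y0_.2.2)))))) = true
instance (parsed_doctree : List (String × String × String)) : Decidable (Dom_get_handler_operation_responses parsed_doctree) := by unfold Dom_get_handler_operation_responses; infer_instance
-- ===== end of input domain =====

-- B replaces A's dict-of-lists accumulation by a two-phase traversal (collect distinct codes in first-occurrence order, then one filter pass per code); objective: alternative, same results.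


-- ===== PORT A =====
-- ret.setdefault(code, []); ret[code].append(description)  ==  ret[code] = ret.get(code, []) + [description],
-- ported exactly as Dict.modify (same key position and value).
def get_handler_operation_responses (parsed_doctree : List (String × String × String)) : List (String × List (String × String)) :=
  let ret : PySem.Dict String (List String) :=
    parsed_doctree.foldl
      (fun d e =>
        if e.1 == "statuscode" then d.modify e.2.1 [] (fun v => v ++ [e.2.2]) else d)
      PySem.Dict.empty
  ret.items.map (fun p => (p.1, [("description", PySem.Str.join " OR " p.2)]))

-- ===== PORT B =====
def get_handler_operation_responses_alt (parsed_doctree : List (String × String × String)) : List (String × List (String × String)) :=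
  let codes : List String :=
    parsed_doctree.foldl
      (fun acc e =>
        if e.1 == "statuscode" && !(acc.contains e.2.1) then acc ++ [e.2.1] else acc)
      []
  codes.map (fun code =>
    (code, [("description", PySem.Str.join " OR "
      (parsed_doctree.filterMap (fun e =>
        if e.1 == "statuscode" && e.2.1 == code then some e.2.2 else none)))]))

-- ===== PRECONDITION & SPEC =====
def Spec_get_handler_operation_responses (parsed_doctree : List (String × String × String)) (out : List (String × List (String × String))) : Prop := out = get_handler_operation_responses_alt parsed_doctree
instance (parsed_doctree : List (String × String × String)) (out : List (String × List (String × String))) : Decidable (Spec_get_handler_operation_responses parsed_doctree out) := by unfold Spec_get_handler_operation_responses; infer_instance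

-- ===== CLAIM (what is proved, stated in full; the proofs are below) =====
def Claim_equal_get_handler_operation_responses : Prop := ∀ (parsed_doctree : List (String × String × String)), Dom_get_handler_operation_responses parsed_doctree → Spec_get_handler_operation_responses parsed_doctree (get_handler_operation_responses parsed_doctree)

-- ===== LEMMAS AND PROOFS =====

-- the statuscode entries of the doctree, as (code, description) pairs
def pvPairs (xs : List (String × String × String)) : List (String × String) :=
  (xs.filter (fun e => e.1 == "statuscode")).map (fun e => (e.2.1, e.2.2))

-- A's guarded loop over triples is the plain modify-loop over the statuscode pairs
theorem pvFoldA_eq (xs : List (String × String × String)) (d : PySem.Dict String (List String)) :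
    xs.foldl
      (fun d e =>
        if e.1 == "statuscode" then d.modify e.2.1 [] (fun v => v ++ [e.2.2]) else d) d
    = (pvPairs xs).foldl (fun d p => d.modify p.1 [] (fun v => v ++ [p.2])) d := by
  induction xs generalizing d with
  | nil => rfl
  | cons e xs ih =>
    by_cases h : e.1 == "statuscode" <;>
      simp [pvPairs, h] <;> simp_all [pvPairs]

-- B's dedup loop collects exactly the distinct codes of the statuscode pairs, in order
theorem pvCodes_eq (xs : List (String × String × String)) (acc : List String) :
    xs.foldl
      (fun acc e =>
        if e.1 == "statuscode" && !(acc.contains e.2.1) then acc ++ [e.2.1] else acc) acc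
    = PySem.Set.update acc ((pvPairs xs).map (fun p => p.1)) := by
  induction xs generalizing acc with
  | nil => rfl
  | cons e xs ih =>
    by_cases h : e.1 == "statuscode"
    · by_cases hc : acc.contains e.2.1 <;>
        simp [pvPairs, h, PySem.Set.update_cons, PySem.Set.add] <;>
        simp_all [pvPairs]
    · simp [pvPairs, h] ; simp_all [pvPairs]

-- B's per-code filter over the doctree equals the filter of the statuscode pairs
theorem pvDescs_eq (xs : List (String × String × String)) (k : String) :
    xs.filterMap (fun e =>
        if e.1 == "statuscode" && e.2.1 == k then some e.2.2 else none)
    = ((pvPairs xs).filter (fun p => p.1 == k)).map (fun p => p.2) := by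
  induction xs with
  | nil => rfl
  | cons e xs ih =>
    by_cases h : e.1 == "statuscode"
    · by_cases hk : e.2.1 == k <;>
        simp [pvPairs, List.filterMap_cons, h, hk] <;> simp_all [pvPairs]
    · simp [pvPairs, List.filterMap_cons, h] ; simp_all [pvPairs]


-- ===== VERDICT (by name: the statement is the Claim_ definition above) =====
theorem get_handler_operation_responses_spec : Claim_equal_get_handler_operation_responses := by
  intro xs _
  unfold Spec_get_handler_operation_responses
  unfold get_handler_operation_responses get_handler_operation_responses_alt
  dsimp only
  rw [pvFoldA_eq, pvCodes_eq]
  set l := pvPairs xs with hl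
  have hnd : ((l.foldl (fun d p => d.modify p.1 [] (fun v => v ++ [p.2])) PySem.Dict.empty)).keys.Nodup :=
    PySem.Dict.nodup_keys_foldl_modify_key l (fun p => p.1) [] (fun _ p => (fun v => v ++ [p.2]))
      PySem.Dict.empty PySem.Dict.nodup_keys_empty
  rw [PySem.Dict.items_eq_map_keys _ hnd ([] : List String)]
  rw [PySem.Dict.keys_foldl_modify_key]
  simp only [PySem.Dict.keys_empty, List.map_map]
  apply List.map_congr_left
  intro k _
  simp only [Function.comp, PySem.Dict.getD_foldl_modify_append, PySem.Dict.getD_empty,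
    List.nil_append, pvDescs_eq]
  rfl
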